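-- pv_equiv track=rewrite | github.com/LHZ98/stage-aware-retinal-image-generation | main/vessel/neovascularization.py | _terminal_endpoints
-- ===== SOURCE A (Python) =====
-- from typing import List, Tuple, Optional
-- from collections import defaultdict
--
-- def _terminal_endpoints(
--     segments: List[List[Tuple[Tuple[int, int], float]]],
-- ) -> List[Tuple[int, int, int, bool]]:
--     """Return list of (seg_idx, end_0_or_minus1, is_start) for each terminal tip.
--     Terminal = (r,c) that appears as endpoint of exactly one segment."""
--     point_to_ends = defaultdict(list)  # (r,c) -> [(seg_idx, at_start), ...]
--     for seg_idx, seg in enumerate(segments):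
--         if not seg:
--             continue
--         (r0, c0), _ = seg[0]
--         (r1, c1), _ = seg[-1]
--         point_to_ends[(r0, c0)].append((seg_idx, True))
--         if (r1, c1) != (r0, c0):
--             point_to_ends[(r1, c1)].append((seg_idx, False))
--     terminals = []
--     for (r, c), ends in point_to_ends.items():
--         if len(ends) == 1:
--             seg_idx, at_start = ends[0]
--             terminals.append((seg_idx, -1 if at_start else 0, at_start))  # end index 0 or -1
--     return terminals
-- ===== SOURCE B (Python) =====
-- from typing import List, Tuple
--
--
-- def _terminal_endpoints(
--     segments: List[List[Tuple[Tuple[int, int], float]]],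
-- ) -> List[Tuple[int, int, int, bool]]:
--     """Two-pass version: first count endpoint occurrences, then walk the
--     segments again and emit each endpoint whose count is 1.  No per-point
--     grouping dict is built; a count-1 point occurs exactly once, so emission
--     in segment order coincides with A's dict-insertion order."""
--     counts = {}
--     for seg in segments:
--         if not seg:
--             continue
--         p0 = seg[0][0]
--         p1 = seg[-1][0]
--         counts[p0] = counts.get(p0, 0) + 1
--         if p1 != p0:
--             counts[p1] = counts.get(p1, 0) + 1
--     out = []
--     for seg_idx, seg in enumerate(segments):
--         if not seg:
--             continue
--         p0 = seg[0][0]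
--         p1 = seg[-1][0]
--         if counts[p0] == 1:
--             out.append((seg_idx, -1, True))
--         if p1 != p0 and counts[p1] == 1:
--             out.append((seg_idx, 0, False))
--     return out
-- ===== Notes on version B (the rewrite author's own statement) =====
-- stated objective: alternative
-- what changed: Replaces the dict-of-lists grouping (point -> list of (seg_idx, at_start)) plus a pass over dict items with two plain passes over the segments: one building only an occurrence counter, one re-deriving each endpoint and emitting it immediately when its count is 1; emission order coincides with A's dict-insertion order because a count-1 point occurs exactly once.
import Mathlib
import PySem

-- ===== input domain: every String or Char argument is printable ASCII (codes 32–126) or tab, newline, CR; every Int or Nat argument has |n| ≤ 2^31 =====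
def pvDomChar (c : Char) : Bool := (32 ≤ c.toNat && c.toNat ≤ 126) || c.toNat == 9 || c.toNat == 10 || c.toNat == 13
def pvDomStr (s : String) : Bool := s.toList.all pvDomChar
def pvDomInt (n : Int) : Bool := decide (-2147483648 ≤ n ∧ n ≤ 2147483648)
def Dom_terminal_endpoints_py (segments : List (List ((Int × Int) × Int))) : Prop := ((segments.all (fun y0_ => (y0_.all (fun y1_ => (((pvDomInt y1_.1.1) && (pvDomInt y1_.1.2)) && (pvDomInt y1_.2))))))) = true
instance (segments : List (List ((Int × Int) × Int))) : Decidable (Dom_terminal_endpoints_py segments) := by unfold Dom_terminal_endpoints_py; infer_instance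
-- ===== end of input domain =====

-- B replaces A's dict-of-lists grouping with two plain passes (count endpoints, then
-- re-walk the segments emitting count-1 endpoints); objective: alternative, same cost.

-- ===== PORT A =====
-- loop body of 'for seg_idx, seg in enumerate(segments): ...' (builds point_to_ends)
def tepAUpdate (d : PySem.Dict (Int × Int) (List (Int × Bool)))
    (pr : Int × List ((Int × Int) × Int)) : PySem.Dict (Int × Int) (List (Int × Bool)) :=
  match pr.2 with
  | [] => d                                     -- if not seg: continue
  | hd :: tl =>
    let p0 := hd.1                              -- (r0, c0), _ = seg[0]
    let p1 := (tl.getLastD hd).1                -- (r1, c1), _ = seg[-1]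
    let d := d.modify p0 [] (fun l => l ++ [(pr.1, true)])   -- defaultdict append
    if p1 ≠ p0 then d.modify p1 [] (fun l => l ++ [(pr.1, false)]) else d

-- loop body of 'for (r, c), ends in point_to_ends.items(): ...'
def tepACollect (acc : List (Int × Int × Bool))
    (pe : (Int × Int) × List (Int × Bool)) : List (Int × Int × Bool) :=
  match pe.2 with
  | [e] => acc ++ [(e.1, (if e.2 then (-1 : Int) else 0, e.2))]   -- len(ends) == 1
  | _ => acc

def terminal_endpoints_py (segments : List (List ((Int × Int) × Int))) : List (Int × Int × Bool) :=
  let point_to_ends := (PySem.List.enumerate segments 0).foldl tepAUpdate PySem.Dict.empty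
  point_to_ends.items.foldl tepACollect []

-- ===== PORT B =====
-- pass 1 loop body: count endpoint occurrences
def tepBCount (c : PySem.Dict (Int × Int) Int)
    (seg : List ((Int × Int) × Int)) : PySem.Dict (Int × Int) Int :=
  match seg with
  | [] => c                                     -- if not seg: continue
  | hd :: tl =>
    let p0 := hd.1
    let p1 := (tl.getLastD hd).1
    let c := c.modify p0 0 (· + 1)              -- counts[p0] = counts.get(p0, 0) + 1
    if p1 ≠ p0 then c.modify p1 0 (· + 1) else c

-- pass 2 loop body: emit endpoints whose count is 1
def tepBEmit (counts : PySem.Dict (Int × Int) Int) (out : List (Int × Int × Bool))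
    (pr : Int × List ((Int × Int) × Int)) : List (Int × Int × Bool) :=
  match pr.2 with
  | [] => out
  | hd :: tl =>
    let p0 := hd.1
    let p1 := (tl.getLastD hd).1
    let out := if counts.getD p0 0 == 1 then out ++ [(pr.1, ((-1 : Int), true))] else out
    if p1 ≠ p0 ∧ counts.getD p1 0 == 1 then out ++ [(pr.1, ((0 : Int), false))] else out

def terminal_endpoints_py_alt (segments : List (List ((Int × Int) × Int))) : List (Int × Int × Bool) :=
  let counts := segments.foldl tepBCount PySem.Dict.empty
  (PySem.List.enumerate segments 0).foldl (tepBEmit counts) []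

-- ===== PRECONDITION & SPEC =====
def Spec_terminal_endpoints_py (segments : List (List ((Int × Int) × Int))) (out : List (Int × Int × Bool)) : Prop := out = terminal_endpoints_py_alt segments
instance (segments : List (List ((Int × Int) × Int))) (out : List (Int × Int × Bool)) : Decidable (Spec_terminal_endpoints_py segments out) := by unfold Spec_terminal_endpoints_py; infer_instance

-- ===== CLAIM (what is proved, stated in full; the proofs are below) =====
def Claim_equal_terminal_endpoints_py : Prop := ∀ (segments : List (List ((Int × Int) × Int))), Dom_terminal_endpoints_py segments → Spec_terminal_endpoints_py segments (terminal_endpoints_py segments)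

-- ===== LEMMAS AND PROOFS =====

def segRecs : Int → List (List ((Int × Int) × Int)) → List ((Int × Int) × (Int × Bool))
  | _, [] => []
  | i, seg :: rest =>
    (match seg with
     | [] => []
     | hd :: tl =>
       let p1 := (tl.getLastD hd).1
       (hd.1, (i, true)) :: (if p1 ≠ hd.1 then [(p1, (i, false))] else []))
    ++ segRecs (i + 1) rest

def tepEmit (e : Int × Bool) : Int × Int × Bool := (e.1, (if e.2 then (-1 : Int) else 0, e.2))

def tepG (ends : List (Int × Bool)) : List (Int × Int × Bool) :=
  match ends with
  | [e] => [tepEmit e]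
  | _ => []

lemma flatMap_congr_mem {α β : Type} (l : List α) (f g : α → List β)
    (h : ∀ x ∈ l, f x = g x) : l.flatMap f = l.flatMap g := by
  induction l with
  | nil => rfl
  | cons x xs ih =>
    simp only [List.flatMap_cons, h x (by simp)]
    rw [ih (fun y hy => h y (by simp [hy]))]

lemma segRecs_A : ∀ (segs : List (List ((Int × Int) × Int))) (i : Int)
    (d : PySem.Dict (Int × Int) (List (Int × Bool))),
    (PySem.List.enumerate segs i).foldl tepAUpdate d
      = (segRecs i segs).foldl (fun d r => d.modify r.1 [] (fun l => l ++ [r.2])) d := by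
  intro segs
  induction segs with
  | nil => intro i d; simp [PySem.List.enumerate_nil, segRecs]
  | cons seg rest ih =>
    intro i d
    rw [PySem.List.enumerate_cons]
    simp only [List.foldl_cons, segRecs, List.foldl_append]
    rw [ih]
    congr 1
    cases seg with
    | nil => rfl
    | cons hd tl =>
      simp only [tepAUpdate]
      by_cases h : (tl.getLast?.getD hd).1 = hd.1 <;>
        simp [List.getLastD_eq_getLast?, h]

lemma segRecs_B : ∀ (segs : List (List ((Int × Int) × Int))) (i : Int)
    (c : PySem.Dict (Int × Int) Int),
    segs.foldl tepBCount c
      = (segRecs i segs).foldl (fun c r => c.modify r.1 0 (· + 1)) c := by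
  intro segs
  induction segs with
  | nil => intro i c; simp [segRecs]
  | cons seg rest ih =>
    intro i c
    simp only [List.foldl_cons, segRecs, List.foldl_append]
    rw [ih (i + 1)]
    congr 1
    cases seg with
    | nil => rfl
    | cons hd tl =>
      simp only [tepBCount]
      by_cases h : (tl.getLast?.getD hd).1 = hd.1 <;>
        simp [List.getLastD_eq_getLast?, h]

lemma segRecs_Bemit (counts : PySem.Dict (Int × Int) Int) :
    ∀ (segs : List (List ((Int × Int) × Int))) (i : Int) (out : List (Int × Int × Bool)),
    (PySem.List.enumerate segs i).foldl (tepBEmit counts) out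
      = (segRecs i segs).foldl
          (fun out r => if counts.getD r.1 0 == 1 then out ++ [tepEmit r.2] else out) out := by
  intro segs
  induction segs with
  | nil => intro i out; simp [PySem.List.enumerate_nil, segRecs]
  | cons seg rest ih =>
    intro i out
    rw [PySem.List.enumerate_cons]
    simp only [List.foldl_cons, segRecs, List.foldl_append]
    rw [ih (i + 1)]
    congr 1
    cases seg with
    | nil => rfl
    | cons hd tl =>
      simp only [tepBEmit, tepEmit]
      by_cases h : (tl.getLast?.getD hd).1 = hd.1 <;>
        by_cases h2 : counts.getD (tl.getLast?.getD hd).1 0 == 1 <;>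
          simp [List.getLastD_eq_getLast?, h, h2] <;> simp_all

lemma tep_cast_beq_one (c : Nat) : ((c : Int) == 1) = (c == 1) := by
  by_cases h : c = 1 <;> simp [h, Nat.cast_eq_one]

lemma tep_countsD (segments : List (List ((Int × Int) × Int))) (p : Int × Int) :
    (segments.foldl tepBCount PySem.Dict.empty).getD p 0
      = (((segRecs 0 segments).map (fun r => r.1)).count p : Int) := by
  rw [segRecs_B segments 0]
  have h : (segRecs 0 segments).foldl
        (fun (c : PySem.Dict (Int × Int) Int) r => c.modify r.1 0 (· + 1)) PySem.Dict.empty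
      = ((segRecs 0 segments).map (fun r => r.1)).foldl
          (fun (c : PySem.Dict (Int × Int) Int) q => c.modify q 0 (· + 1)) PySem.Dict.empty :=
    (List.foldl_map (f := fun (r : (Int × Int) × Int × Bool) => r.1)
      (g := fun (c : PySem.Dict (Int × Int) Int) q => c.modify q 0 (· + 1))).symm
  rw [h, PySem.Dict.getD_foldl_modify_add_one]
  simp

lemma tepACollect_eq (acc : List (Int × Int × Bool)) (pe : (Int × Int) × List (Int × Bool)) :
    tepACollect acc pe = acc ++ tepG pe.2 := by
  rcases pe with ⟨p, ends⟩
  match ends with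
  | [] => simp [tepACollect, tepG]
  | [e] => simp [tepACollect, tepG, tepEmit]
  | e1 :: e2 :: rest => simp [tepACollect, tepG]

lemma tep_outA (segments : List (List ((Int × Int) × Int))) :
    terminal_endpoints_py segments
      = (PySem.Set.ofList ((segRecs 0 segments).map (fun r => r.1))).flatMap
          (fun p => tepG (((segRecs 0 segments).filter (fun r => r.1 == p)).map (fun r => r.2))) := by
  show ((PySem.List.enumerate segments 0).foldl tepAUpdate PySem.Dict.empty).items.foldl
      tepACollect [] = _
  rw [segRecs_A segments 0]
  set R := segRecs 0 segments with hR
  set d := R.foldl (fun d r => d.modify r.1 [] (fun l => l ++ [r.2])) PySem.Dict.empty with hd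
  have hkeys : d.keys = PySem.Set.ofList (R.map (fun r => r.1)) := by
    have h := PySem.Dict.keys_foldl_modify_key R (fun r => r.1) []
      (fun _ r => fun l => l ++ [r.2]) PySem.Dict.empty
    rw [hd]
    simpa [PySem.Dict.keys_empty, PySem.Set.update_nil_left] using h
  have hnodup : d.keys.Nodup := by
    rw [hd]
    exact PySem.Dict.nodup_keys_foldl_modify_key R (fun r => r.1) []
      (fun _ r => fun l => l ++ [r.2]) PySem.Dict.empty PySem.Dict.nodup_keys_empty
  have hgetD : ∀ p, d.getD p [] = (R.filter (fun r => r.1 == p)).map (fun r => r.2) := by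
    intro p
    have h := PySem.Dict.getD_foldl_modify_append R PySem.Dict.empty p
    rw [hd]
    simpa using h
  have hitems : d.items = (PySem.Set.ofList (R.map (fun r => r.1))).map
      (fun p => (p, (R.filter (fun r => r.1 == p)).map (fun r => r.2))) := by
    rw [PySem.Dict.items_eq_map_keys d hnodup [], hkeys]
    exact List.map_congr_left (fun p _ => by rw [hgetD])
  rw [hitems]
  have hfold : ∀ (l : List ((Int × Int) × List (Int × Bool))),
      l.foldl tepACollect [] = l.flatMap (fun pe => tepG pe.2) := by
    intro l
    rw [PySem.List.foldl_congr_mem l tepACollect (fun acc pe => acc ++ tepG pe.2) []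
      (fun acc pe _ => tepACollect_eq acc pe)]
    have h : l.foldl (fun acc pe => acc ++ tepG pe.2) [] = [] ++ l.flatMap (fun pe => tepG pe.2) :=
      PySem.List.foldl_append_eq_flatMap _ _ _
    simpa using h
  rw [hfold, List.flatMap_map]

lemma tep_outB (segments : List (List ((Int × Int) × Int))) :
    terminal_endpoints_py_alt segments
      = ((segRecs 0 segments).filter
          (fun r => ((segRecs 0 segments).map (fun r => r.1)).count r.1 == 1)).map
          (fun r => tepEmit r.2) := by
  show (PySem.List.enumerate segments 0).foldl
      (tepBEmit (segments.foldl tepBCount PySem.Dict.empty)) [] = _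
  rw [segRecs_Bemit _ segments 0]
  have h2 : (segRecs 0 segments).foldl
      (fun out r => if (segments.foldl tepBCount PySem.Dict.empty).getD r.1 0 == 1
        then out ++ [tepEmit r.2] else out) ([] : List (Int × Int × Bool))
      = [] ++ ((segRecs 0 segments).filter
          (fun r => (segments.foldl tepBCount PySem.Dict.empty).getD r.1 0 == 1)).map
          (fun r => tepEmit r.2) :=
    PySem.List.foldl_append_if _ _ _ _
  rw [h2]
  rw [List.filter_congr (fun r _ => by rw [tep_countsD, tep_cast_beq_one])]
  simp

lemma tep_core : ∀ (R : List ((Int × Int) × (Int × Bool))) (ban : (Int × Int) → Bool),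
    ((PySem.Set.ofList (R.map (fun r => r.1))).filter (fun p => !ban p)).flatMap
      (fun p => tepG ((R.filter (fun r => r.1 == p)).map (fun r => r.2)))
    = (R.filter (fun r => !ban r.1 && (R.map (fun r => r.1)).count r.1 == 1)).map
        (fun r => tepEmit r.2) := by
  intro R
  induction R with
  | nil => intro ban; simp [PySem.Set.ofList_nil]
  | cons r R' ih =>
    intro ban
    have hdis : (PySem.Set.ofList (R'.map (fun r => r.1))).discard r.1
        = (PySem.Set.ofList (R'.map (fun r => r.1))).filter (fun y => !(y == r.1)) := rfl
    simp only [List.map_cons]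
    rw [PySem.Set.ofList_cons]
    rw [List.filter_cons]
    simp only [hdis, List.filter_filter]
    -- the common tail of the LHS
    have htail :
        ((PySem.Set.ofList (R'.map (fun r => r.1))).filter
            (fun a => !ban a && !(a == r.1))).flatMap
          (fun p => tepG (((r :: R').filter (fun q => q.1 == p)).map (fun q => q.2)))
        = (R'.filter (fun q => !(ban q.1 || q.1 == r.1)
              && (R'.map (fun r => r.1)).count q.1 == 1)).map (fun q => tepEmit q.2) := by
      rw [List.filter_congr (fun a _ => by
        show (!ban a && !(a == r.1)) = !(ban a || a == r.1)
        cases hba : ban a <;> cases hae : a == r.1 <;> rfl)]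
      rw [flatMap_congr_mem _ _
        (fun p => tepG ((R'.filter (fun q => q.1 == p)).map (fun q => q.2)))
        (fun p hp => by
          have hne : (r.1 == p) = false := by
            have h1 := (List.mem_filter.mp hp).2
            simp only [Bool.not_eq_eq_eq_not, Bool.not_true, Bool.or_eq_false_iff] at h1
            have : p ≠ r.1 := by simpa using h1.2
            simpa using (Ne.symm this)
          rw [List.filter_cons, hne]
          simp)]
      exact ih (fun p => ban p || p == r.1)
    -- the common tail of the RHS
    have hrtail :
        R'.filter (fun q => !ban q.1 && ((r.1 :: R'.map (fun r => r.1)).count q.1 == 1))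
        = R'.filter (fun q => !(ban q.1 || q.1 == r.1)
            && (R'.map (fun r => r.1)).count q.1 == 1) := by
      apply List.filter_congr
      intro q hq
      by_cases hq1 : q.1 = r.1
      · have hmem : q.1 ∈ R'.map (fun r => r.1) := List.mem_map.mpr ⟨q, hq, rfl⟩
        have hcnt : 0 < (R'.map (fun r => r.1)).count q.1 := List.count_pos_iff.mpr hmem
        have hbe : (r.1 == q.1) = true := by simp [hq1]
        have h1 : ((r.1 :: R'.map (fun r => r.1)).count q.1 == 1) = false := by
          rw [List.count_cons, hbe]
          simp only [if_true, beq_eq_false_iff_ne]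
          omega
        have h2 : (!(ban q.1 || q.1 == r.1)) = false := by simp [hq1]
        simp [h1, h2]
      · have h1 : (r.1 == q.1) = false := by simpa using (Ne.symm hq1)
        have h2 : (q.1 == r.1) = false := by simpa using hq1
        rw [List.count_cons, h1]
        simp [h2]
    have hcc : (r.1 :: R'.map (fun r => r.1)).count r.1
        = (R'.map (fun r => r.1)).count r.1 + 1 := by
      rw [List.count_cons]; simp
    rw [List.filter_cons]
    by_cases hb : ban r.1
    · -- banned head point: drops from both sides
      have hL : ¬((!ban r.1) = true) := by simp [hb]
      have hR : ¬((!ban r.1 && ((r.1 :: R'.map (fun r => r.1)).count r.1 == 1)) = true) := by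
        simp [hb]
      rw [if_neg hL, if_neg hR, hrtail]
      exact htail
    · have hL : (!ban r.1) = true := by simp [hb]
      by_cases hm : r.1 ∈ R'.map (fun r => r.1)
      · -- head point occurs again later: emitted by neither side
        have hcnt : 0 < (R'.map (fun r => r.1)).count r.1 := List.count_pos_iff.mpr hm
        have hR : ¬((!ban r.1 && ((r.1 :: R'.map (fun r => r.1)).count r.1 == 1)) = true) := by
          rw [hcc]
          simp only [Bool.and_eq_true, beq_iff_eq]
          omega
        have hgrp : tepG (((r :: R').filter (fun q => q.1 == r.1)).map (fun q => q.2)) = [] := by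
          rw [List.filter_cons, if_pos (by simp)]
          obtain ⟨q, hqmem, hq1⟩ := List.mem_map.mp hm
          have hne : R'.filter (fun q => q.1 == r.1) ≠ [] := by
            intro hnil
            have := List.filter_eq_nil_iff.mp hnil q hqmem
            simp [hq1] at this
          rcases hfe : R'.filter (fun q => q.1 == r.1) with _ | ⟨x, xs⟩
          · exact absurd hfe hne
          · rw [hfe]
            rfl
        rw [if_pos hL, if_neg hR]
        rw [List.flatMap_cons, hgrp, List.nil_append, hrtail]
        exact htail
      · -- genuinely terminal head point: emitted by both sides
        have hcnt : (R'.map (fun r => r.1)).count r.1 = 0 := List.count_eq_zero.mpr hm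
        have hR : (!ban r.1 && ((r.1 :: R'.map (fun r => r.1)).count r.1 == 1)) = true := by
          rw [hcc, hcnt]
          simp [hb]
        have hgrp : tepG (((r :: R').filter (fun q => q.1 == r.1)).map (fun q => q.2))
            = [tepEmit r.2] := by
          rw [List.filter_cons, if_pos (by simp)]
          have h2 : R'.filter (fun q => q.1 == r.1) = [] := by
            rw [List.filter_eq_nil_iff]
            intro q hq hcon
            exact hm (List.mem_map.mpr ⟨q, hq, by simpa using hcon⟩)
          rw [h2]
          rfl
        rw [if_pos hL, if_pos hR]
        rw [List.flatMap_cons, hgrp, List.map_cons, hrtail, htail]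
        rfl

-- ===== VERDICT (by name: the statement is the Claim_ definition above) =====
theorem terminal_endpoints_py_spec : Claim_equal_terminal_endpoints_py := by
  intro segments _
  unfold Spec_terminal_endpoints_py
  rw [tep_outA, tep_outB]
  have h := tep_core (segRecs 0 segments) (fun _ => false)
  simpa using h
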